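-- pv_equiv track=rewrite | github.com/sauter-roland/advent_of_code | 2025/03/a.py | get_joltage
-- ===== SOURCE A (Python) =====
-- def get_joltage(battery: str) -> int:
--     battery = battery.strip()
--     first, index = 0, 0
--     second = 0
--     for idx, char in enumerate(battery[:-1]):
--         number = int(char)
--         if number > first:
--             first = number
--             index = idx
--     for char in battery[index + 1:]:
--         number = int(char)
--         if number > second:
--             second = number
--     return 10 * first + second
-- ===== SOURCE B (Python) =====
-- def get_joltage(battery: str) -> int:
--     s = battery.strip()
--     best_tens = 0
--     answer = 0
--     prev = None
--     for char in s:
--         d = int(char)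
--         if prev is not None:
--             if prev > best_tens:
--                 best_tens = prev
--             if 10 * best_tens + d > answer:
--                 answer = 10 * best_tens + d
--         prev = d
--     return answer
-- ===== Notes on version B (the rewrite author's own statement) =====
-- stated objective: simpler
-- what changed: Replaces A's two-phase scheme (find the leftmost maximum digit among all but the last character, then rescan the suffix after it) by a single forward pass maintaining the running prefix-maximum tens digit and the best two-digit value so far.
-- outside the precondition, e.g. on get_joltage('a'): A returns 0, B raises ValueError
import Mathlib
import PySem

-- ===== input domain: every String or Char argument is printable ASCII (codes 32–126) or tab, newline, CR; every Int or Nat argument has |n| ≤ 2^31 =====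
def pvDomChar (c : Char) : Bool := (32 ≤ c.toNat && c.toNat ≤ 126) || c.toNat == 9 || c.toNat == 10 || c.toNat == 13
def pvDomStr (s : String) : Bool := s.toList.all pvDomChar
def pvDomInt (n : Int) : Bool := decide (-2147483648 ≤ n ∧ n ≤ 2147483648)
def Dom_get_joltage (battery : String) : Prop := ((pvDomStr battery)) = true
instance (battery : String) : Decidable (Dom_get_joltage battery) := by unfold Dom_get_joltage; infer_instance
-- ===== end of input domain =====

-- B replaces A's two passes (leftmost-max tens digit, then a rescan of the suffix after it)
-- by a single forward pass keeping the running prefix maximum and the best value so far (objective: simpler).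

-- int(char) for a single character; the `.getD 0` default is never reached under Pre_ (all chars are digits)
def pyIntChar (c : Char) : Int := (PySem.Int.ofChars? [c]).getD 0

-- ===== PORT A =====
def get_joltage (battery : String) : Int :=
  let b := PySem.Str.strip battery
  let fi := (PySem.List.enumerate ((PySem.Str.slice b none (some (-1))).toList)).foldl
      (fun (p : Int × Int) ic =>
        let number := pyIntChar ic.2
        if number > p.1 then (number, ic.1) else p) (0, 0)
  let second := ((PySem.Str.slice b (some (fi.2 + 1)) none).toList).foldl
      (fun sec c =>
        let number := pyIntChar c
        if number > sec then number else sec) 0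
  10 * fi.1 + second

-- ===== PORT B =====
def get_joltage_alt (battery : String) : Int :=
  let s := PySem.Str.strip battery
  let r := s.toList.foldl
      (fun (st : Int × Int × Option Int) ch =>
        let d := pyIntChar ch
        match st.2.2 with
        | none => (st.1, st.2.1, some d)
        | some prev =>
          let best := if prev > st.1 then prev else st.1
          let ans := if 10 * best + d > st.2.1 then 10 * best + d else st.2.1
          (best, ans, some d))
      (0, 0, none)
  r.2.1

-- ===== PRECONDITION & SPEC =====
-- Pre_ excludes stripped strings containing a non-digit character: on those A raises ValueError
-- (int(char) on a non-digit), except when the stripped string is a single non-digit character,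
-- where A's loops never run and it returns 0 while B, which reads every character, raises ValueError.
def Pre_get_joltage (battery : String) : Prop :=
  ((PySem.Str.strip battery).toList.all Char.isDigit) = true
instance (battery : String) : Decidable (Pre_get_joltage battery) := by unfold Pre_get_joltage; infer_instance
def pvWitness_get_joltage : String := "2817"

def Spec_get_joltage (battery : String) (out : Int) : Prop := out = get_joltage_alt battery
instance (battery : String) (out : Int) : Decidable (Spec_get_joltage battery out) := by unfold Spec_get_joltage; infer_instance

-- ===== CLAIM (what is proved, stated in full; the proofs are below) =====
def Claim_equal_get_joltage : Prop := ∀ (battery : String), Dom_get_joltage battery → Pre_get_joltage battery → Spec_get_joltage battery (get_joltage battery)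

-- ===== LEMMAS AND PROOFS =====

-- max of a list of ints with initial value 0 (the shape of both of A's "if number > acc" folds)
def m0 (l : List Int) : Int := l.foldl max 0

-- index of the leftmost maximum (what A's first loop leaves in `index`)
def idx0 (l : List Int) : Nat := l.findIdx (fun d => d == m0 l)

-- closed form of A's result on the digit list
def Aabs (ds : List Int) : Int :=
  10 * m0 ds.dropLast + m0 (ds.drop (idx0 ds.dropLast + 1))

-- B's loop body on the digit list
def bstep (st : Int × Int × Option Int) (d : Int) : Int × Int × Option Int :=
  match st.2.2 with
  | none => (st.1, st.2.1, some d)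
  | some prev =>
    let best := if prev > st.1 then prev else st.1
    let ans := if 10 * best + d > st.2.1 then 10 * best + d else st.2.1
    (best, ans, some d)

def Babs (ds : List Int) : Int := (ds.foldl bstep (0, 0, none)).2.1

-- "best two-digit value over the suffix t, given prefix maximum p"
def Hf : Int → List Int → Int
  | _, [] => 0
  | p, d :: t => max (10 * p + d) (Hf (max p d) t)

theorem if_max (a d : Int) : (if d > a then d else a) = max a d := by
  rw [max_def]; split_ifs <;> omega

theorem m0_nonneg (l : List Int) : 0 ≤ m0 l := (PySem.List.le_foldl_max l 0).1

theorem le_m0 (l : List Int) (x : Int) (h : x ∈ l) : x ≤ m0 l :=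
  (PySem.List.le_foldl_max l 0).2 x h

theorem foldl_max_le (l : List Int) : ∀ a b : Int, a ≤ b → (∀ x ∈ l, x ≤ b) → l.foldl max a ≤ b := by
  induction l with
  | nil => intro a b h _; exact h
  | cons d t ih =>
    intro a b h hx
    exact ih _ b (max_le h (hx d (by simp))) (fun x hm => hx x (List.mem_cons_of_mem _ hm))

theorem m0_le (l : List Int) (b : Int) (hb : 0 ≤ b) (h : ∀ x ∈ l, x ≤ b) : m0 l ≤ b :=
  foldl_max_le l 0 b hb h

theorem foldl_max_comm (l : List Int) : ∀ a b : Int, l.foldl max (max a b) = max a (l.foldl max b) := by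
  induction l with
  | nil => intro a b; rfl
  | cons x t ih => intro a b; simp only [List.foldl_cons, max_assoc, ih]

theorem m0_cons (d : Int) (l : List Int) (h : 0 ≤ d) : m0 (d :: l) = max d (m0 l) := by
  have h1 : max (0 : Int) d = max d 0 := max_comm _ _
  simp only [m0, List.foldl_cons, h1, foldl_max_comm]

theorem m0_append_singleton (l : List Int) (d : Int) : m0 (l ++ [d]) = max (m0 l) d := by
  simp [m0, List.foldl_append]

theorem m0_mem (l : List Int) (h0 : ∀ x ∈ l, 0 ≤ x) (hl : l ≠ []) : m0 l ∈ l := by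
  induction l with
  | nil => exact absurd rfl hl
  | cons d t ih =>
    rw [m0_cons d t (h0 d (by simp))]
    rcases eq_or_ne t [] with ht | ht
    · subst ht
      have : max d (m0 ([] : List Int)) = d := by
        have := h0 d (by simp)
        simp [m0]; omega
      simp [this]
    · rcases le_total (m0 t) d with hle | hle
      · simp [max_eq_left hle]
      · rw [max_eq_right hle]
        exact List.mem_cons_of_mem _ (ih (fun x hx => h0 x (List.mem_cons_of_mem _ hx)) ht)

theorem enumerate_map {α β : Type} (l : List α) (f : α → β) (k : Int) :
    PySem.List.enumerate (l.map f) k = (PySem.List.enumerate l k).map (fun p => (p.1, f p.2)) := by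
  induction l generalizing k with
  | nil => rfl
  | cons x t ih => simp [PySem.List.enumerate_cons, ih]

theorem firstFold (l : List Int) (h0 : ∀ x ∈ l, 0 ≤ x) :
    (PySem.List.enumerate l).foldl
      (fun (p : Int × Int) ic => if ic.2 > p.1 then (ic.2, ic.1) else p) (0, 0)
      = (m0 l, (idx0 l : Int)) := by
  induction l using List.reverseRecOn with
  | nil => simp [PySem.List.enumerate, m0, idx0]
  | append_singleton t d ih =>
    have h0t : ∀ x ∈ t, 0 ≤ x := fun x hx => h0 x (List.mem_append_left _ hx)
    have hd : 0 ≤ d := h0 d (by simp)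
    rw [PySem.List.enumerate_append, List.foldl_append, ih h0t]
    have hsing : PySem.List.enumerate [d] ((0:Int) + t.length) = [((t.length : Int), d)] := by
      simp [PySem.List.enumerate_cons, PySem.List.enumerate]
    rw [hsing]
    simp only [List.foldl_cons, List.foldl_nil]
    by_cases hcmp : d > m0 t
    · rw [if_pos hcmp]
      have hm : m0 (t ++ [d]) = d := by rw [m0_append_singleton]; omega
      have hidx : idx0 (t ++ [d]) = t.length := by
        unfold idx0
        rw [hm, List.findIdx_append]
        have hnone : List.findIdx (fun x => x == d) t = t.length := by
          rw [List.findIdx_eq_length]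
          intro x hx
          have := le_m0 t x hx
          simp; omega
        rw [hnone]
        simp
      rw [hm, hidx]
    · rw [if_neg hcmp]
      have hm : m0 (t ++ [d]) = m0 t := by rw [m0_append_singleton]; omega
      have hidx : idx0 (t ++ [d]) = idx0 t := by
        unfold idx0
        rw [hm]
        rcases eq_or_ne t [] with ht | ht
        · subst ht
          have : m0 ([] : List Int) = 0 := rfl
          have hd0 : d = 0 := by simp [this] at hcmp; omega
          subst hd0; rfl
        · have hmem : m0 t ∈ t := m0_mem t h0t ht
          have hfound : List.findIdx (fun x => x == m0 t) t < t.length := by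
            rw [List.findIdx_lt_length]
            exact ⟨m0 t, hmem, by simp⟩
          rw [List.findIdx_append, if_pos hfound]
      rw [hm, hidx]

theorem Hf_nonneg (t : List Int) : ∀ p : Int, 0 ≤ p → (∀ d ∈ t, 0 ≤ d) → 0 ≤ Hf p t := by
  induction t with
  | nil => intro p hp _; simp [Hf]
  | cons d t ih =>
    intro p hp hd
    simp only [Hf, le_max_iff]
    right
    exact ih (max p d) (le_max_of_le_left hp) (fun x hx => hd x (List.mem_cons_of_mem _ hx))

theorem G_closed (t : List Int) : ∀ (best ans prev : Int), 0 ≤ ans →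
    (t.foldl bstep (best, ans, some prev)).2.1 = max ans (Hf (max best prev) t) := by
  induction t with
  | nil => intro best ans prev h; simp [Hf, max_eq_left h]
  | cons d t ih =>
    intro best ans prev h
    have hstep : bstep (best, ans, some prev) d
        = (max best prev, max ans (10 * max best prev + d), some d) := by
      simp [bstep, if_max]
    rw [List.foldl_cons, hstep, ih _ _ _ (le_max_of_le_left h)]
    simp only [Hf]
    rw [max_assoc]

theorem Babs_cons (d : Int) (t : List Int) (hd : 0 ≤ d) (ht : ∀ x ∈ t, 0 ≤ x) :
    Babs (d :: t) = Hf d t := by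
  have h1 : bstep (0, 0, none) d = (0, 0, some d) := rfl
  have := G_closed t 0 0 d le_rfl
  simp only [Babs, List.foldl_cons, h1, this, max_eq_right hd]
  exact max_eq_right (Hf_nonneg t d hd ht)

theorem H_closed (t : List Int) : ∀ p : Int, 0 ≤ p → p ≤ 9 → (∀ d ∈ t, 0 ≤ d ∧ d ≤ 9) → t ≠ [] →
    Hf p t = if m0 t.dropLast ≤ p then 10 * p + m0 t
             else 10 * m0 t.dropLast + m0 (t.drop (idx0 t.dropLast + 1)) := by
  induction t with
  | nil => intro p _ _ _ h; exact absurd rfl h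
  | cons d t ih =>
    intro p hp0 hp9 hb _
    have hd0 : 0 ≤ d := (hb d (by simp)).1
    have hd9 : d ≤ 9 := (hb d (by simp)).2
    have hbt : ∀ x ∈ t, 0 ≤ x ∧ x ≤ 9 := fun x hx => hb x (List.mem_cons_of_mem _ hx)
    have hbt0 : ∀ x ∈ t, 0 ≤ x := fun x hx => (hbt x hx).1
    rcases eq_or_ne t [] with ht | ht
    · subst ht
      have h1 : m0 ([d] : List Int).dropLast = 0 := rfl
      have h2 : m0 [d] = d := by rw [m0_cons d [] hd0]; simp [m0]; omega
      simp only [Hf, h1, h2, if_pos hp0]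
      exact max_eq_left (by omega)
    · have hdl : (d :: t).dropLast = d :: t.dropLast := by
        rcases t with _ | ⟨y, t'⟩
        · exact absurd rfl ht
        · rfl
      have hdl0 : ∀ x ∈ t.dropLast, 0 ≤ x := fun x hx => hbt0 x (List.mem_of_mem_dropLast hx)
      have hM'9 : m0 t.dropLast ≤ 9 := by
        rcases eq_or_ne t.dropLast [] with h | h
        · rw [h]; simp [m0]
        · exact m0_le _ 9 (by omega) (fun x hx => (hbt x (List.mem_of_mem_dropLast hx)).2)
      set M' := m0 t.dropLast with hMdef
      have hMcons : m0 ((d :: t).dropLast) = max d M' := by rw [hdl, m0_cons d _ hd0]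
      have hMcons' : m0 (d :: t.dropLast) = max d M' := m0_cons d _ hd0
      rw [Hf]
      by_cases hc : max d M' ≤ p
      · -- branch 1 overall
        rw [if_pos (by rw [hMcons]; exact hc)]
        have hpd : max p d = p := max_eq_left (le_trans (le_max_left d M') hc)
        rw [hpd]
        have hHt : Hf p t = 10 * p + m0 t := by
          rw [ih p hp0 hp9 hbt ht, if_pos (le_trans (le_max_right d M') hc)]
        rw [hHt, m0_cons d t hd0]
        have h1 : m0 t ≤ 10 * p + m0 t := by omega
        omega
      · rw [if_neg (by rw [hMcons]; exact hc)]
        push_neg at hc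
        by_cases hsub : M' ≤ d
        · -- d is the (leftmost) max of dropLast
          have hpd : p < d := by omega
          have hidx : idx0 ((d :: t).dropLast) = 0 := by
            unfold idx0
            rw [hdl, hMcons', List.findIdx_cons]
            have : (d == max d M') = true := by simp [max_eq_left hsub]
            simp [this]
          have hHt : Hf (max p d) t = 10 * d + m0 t := by
            rw [max_eq_right (le_of_lt hpd)]
            rw [ih d hd0 hd9 hbt ht, if_pos hsub]
          rw [hHt, hidx, hMcons, max_eq_left hsub]
          have hdrop : (d :: t).drop 1 = t := rfl
          rw [hdrop]
          have hm0t : 0 ≤ m0 t := m0_nonneg t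
          have : 10 * p + d ≤ 10 * d + m0 t := by omega
          omega
        · -- max sits inside t.dropLast
          push_neg at hsub
          have hp'M : max p d < M' := by omega
          have hidx : idx0 ((d :: t).dropLast) = idx0 t.dropLast + 1 := by
            unfold idx0
            rw [hdl, hMcons', max_eq_right (le_of_lt hsub), List.findIdx_cons]
            have : (d == M') = false := by simp; omega
            simp only [this, cond_false, Bool.false_eq_true, if_false]
            rfl
          have hHt : Hf (max p d) t = 10 * M' + m0 (t.drop (idx0 t.dropLast + 1)) := by
            rw [ih (max p d) (le_max_of_le_left hp0) (by omega) hbt ht, if_neg (by omega)]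
          rw [hHt, hidx, hMcons, max_eq_right (le_of_lt hsub)]
          have hdrop : (d :: t).drop (idx0 t.dropLast + 1 + 1) = t.drop (idx0 t.dropLast + 1) := rfl
          rw [hdrop]
          have hm0 : 0 ≤ m0 (t.drop (idx0 t.dropLast + 1)) := m0_nonneg _
          have : 10 * p + d < 10 * M' := by omega
          omega

theorem AB (ds : List Int) (hd : ∀ d ∈ ds, 0 ≤ d ∧ d ≤ 9) : Babs ds = Aabs ds := by
  cases ds with
  | nil => decide
  | cons d0 t =>
    have hd0 := hd d0 (by simp)
    have hbt : ∀ x ∈ t, 0 ≤ x ∧ x ≤ 9 := fun x hx => hd x (List.mem_cons_of_mem _ hx)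
    rw [Babs_cons d0 t hd0.1 (fun x hx => (hbt x hx).1)]
    rcases eq_or_ne t [] with ht | ht
    · subst ht
      show (0 : Int) = Aabs [d0]
      have h1 : m0 ([d0] : List Int).dropLast = 0 := rfl
      have h2 : idx0 ([d0] : List Int).dropLast = 0 := rfl
      simp [Aabs, h1, h2, m0]
    · rw [H_closed t d0 hd0.1 hd0.2 hbt ht]
      unfold Aabs
      have hdl : (d0 :: t).dropLast = d0 :: t.dropLast := by
        rcases t with _ | ⟨y, t'⟩
        · exact absurd rfl ht
        · rfl
      have hMcons' : m0 (d0 :: t.dropLast) = max d0 (m0 t.dropLast) := m0_cons d0 _ hd0.1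
      by_cases hc : m0 t.dropLast ≤ d0
      · rw [if_pos hc]
        have h1 : m0 ((d0 :: t).dropLast) = d0 := by
          rw [hdl, hMcons', max_eq_left hc]
        have hidx : idx0 ((d0 :: t).dropLast) = 0 := by
          unfold idx0
          rw [hdl]
          rw [List.findIdx_cons]
          have hb : (d0 == m0 (d0 :: t.dropLast)) = true := by
            rw [hMcons', max_eq_left hc]; simp
          simp only [hb, cond_true]
        rw [h1, hidx]
        have hdrop : (d0 :: t).drop (0 + 1) = t := rfl
        rw [hdrop]
      · rw [if_neg hc]
        have hlt : d0 < m0 t.dropLast := by omega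
        have h1 : m0 ((d0 :: t).dropLast) = m0 t.dropLast := by
          rw [hdl, hMcons', max_eq_right (le_of_lt hlt)]
        have hidx : idx0 ((d0 :: t).dropLast) = idx0 t.dropLast + 1 := by
          unfold idx0
          rw [hdl]
          rw [List.findIdx_cons]
          have hb : (d0 == m0 (d0 :: t.dropLast)) = false := by
            rw [hMcons', max_eq_right (le_of_lt hlt)]; simp; omega
          simp only [hb, cond_false]
          rw [hMcons', max_eq_right (le_of_lt hlt)]
        rw [h1, hidx]
        have hdrop : (d0 :: t).drop (idx0 t.dropLast + 1 + 1) = t.drop (idx0 t.dropLast + 1) := rfl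
        rw [hdrop]

theorem pyIntChar_digit (c : Char) (h : c.isDigit = true) : 0 ≤ pyIntChar c ∧ pyIntChar c ≤ 9 := by
  have h1 : 48 ≤ c.toNat ∧ c.toNat ≤ 57 := by
    simp [Char.isDigit] at h; exact ⟨h.1, h.2⟩
  have hcases : c = '0' ∨ c = '1' ∨ c = '2' ∨ c = '3' ∨ c = '4' ∨ c = '5' ∨ c = '6' ∨ c = '7' ∨ c = '8' ∨ c = '9' := by
    have h2 : 48 ≤ c.val.toNat ∧ c.val.toNat ≤ 57 := h1
    simp only [Char.ext_iff, UInt32.ext_iff]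
    show c.val.toNat = 48 ∨ c.val.toNat = 49 ∨ c.val.toNat = 50 ∨ c.val.toNat = 51 ∨ c.val.toNat = 52 ∨
      c.val.toNat = 53 ∨ c.val.toNat = 54 ∨ c.val.toNat = 55 ∨ c.val.toNat = 56 ∨ c.val.toNat = 57
    omega
  rcases hcases with h|h|h|h|h|h|h|h|h|h <;> subst h <;> decide

set_option maxHeartbeats 1000000 in
theorem A_bridge (battery : String) (hpre : ∀ c ∈ (PySem.Str.strip battery).toList, c.isDigit = true) :
    get_joltage battery = Aabs ((PySem.Str.strip battery).toList.map pyIntChar) := by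
  have hd : ∀ d ∈ (PySem.Str.strip battery).toList.map pyIntChar, 0 ≤ d ∧ d ≤ 9 := by
    intro d hdm
    obtain ⟨c, hc, rfl⟩ := List.mem_map.1 hdm
    exact pyIntChar_digit c (hpre c hc)
  have hfold1 :
      (PySem.List.enumerate ((PySem.Str.strip battery).toList.dropLast)).foldl
        (fun (p : Int × Int) ic => if pyIntChar ic.2 > p.1 then (pyIntChar ic.2, ic.1) else p) (0, 0)
      = (m0 (((PySem.Str.strip battery).toList.map pyIntChar).dropLast),
         ((idx0 (((PySem.Str.strip battery).toList.map pyIntChar).dropLast) : Nat) : Int)) := by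
    rw [← firstFold _ (fun x hx => (hd x (List.mem_of_mem_dropLast hx)).1)]
    rw [← List.map_dropLast, enumerate_map, List.foldl_map]
  unfold get_joltage
  dsimp only
  rw [PySem.Str.slice_to_neg_one, hfold1]
  dsimp only
  have hcast : ((idx0 (((PySem.Str.strip battery).toList.map pyIntChar).dropLast) : Nat) : Int) + 1
      = (((idx0 (((PySem.Str.strip battery).toList.map pyIntChar).dropLast) + 1 : Nat)) : Int) := by
    push_cast; ring
  rw [hcast]
  have hsl : (PySem.Str.slice (PySem.Str.strip battery)
      (some (((idx0 (((PySem.Str.strip battery).toList.map pyIntChar).dropLast) + 1 : Nat)) : Int)) none).toList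
      = (PySem.Str.strip battery).toList.drop (idx0 (((PySem.Str.strip battery).toList.map pyIntChar).dropLast) + 1) := by
    rw [PySem.Str.toList_slice, PySem.Chars.slice_eq_listSlice, PySem.List.slice_from_natCast]
  rw [hsl]
  have hsec : ((PySem.Str.strip battery).toList.drop
        (idx0 (((PySem.Str.strip battery).toList.map pyIntChar).dropLast) + 1)).foldl
      (fun sec c => if pyIntChar c > sec then pyIntChar c else sec) 0
      = m0 (((PySem.Str.strip battery).toList.map pyIntChar).drop
        (idx0 (((PySem.Str.strip battery).toList.map pyIntChar).dropLast) + 1)) := by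
    unfold m0
    rw [← List.map_drop, List.foldl_map]
    simp only [if_max]
  rw [hsec]
  unfold Aabs
  rfl

theorem B_bridge (battery : String) :
    get_joltage_alt battery = Babs ((PySem.Str.strip battery).toList.map pyIntChar) := by
  unfold get_joltage_alt Babs
  rw [List.foldl_map]
  rfl

-- ===== VERDICT (by name: the statement is the Claim_ definition above) =====
theorem get_joltage_spec : Claim_equal_get_joltage := by
  intro battery _ hpre0
  have hpre : ∀ c ∈ (PySem.Str.strip battery).toList, c.isDigit = true :=
    fun c hc => List.all_eq_true.mp hpre0 c hc
  unfold Spec_get_joltage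
  have hd : ∀ d ∈ (PySem.Str.strip battery).toList.map pyIntChar, 0 ≤ d ∧ d ≤ 9 := by
    intro d hdm
    obtain ⟨c, hc, rfl⟩ := List.mem_map.1 hdm
    exact pyIntChar_digit c (hpre c hc)
  rw [A_bridge battery hpre, B_bridge battery, AB _ hd]
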